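-- pv_equiv track=rewrite | github.com/postvakje/oeis-sequences | oeis-sequences/OEISsequences.py | A091049
-- ===== SOURCE A (Python) =====
-- def A091049(n):
--     k = 1
--     while True:
--         m1 = k
--         for i in range(n + 1):
--             m2 = int(str(m1), 1 + max(int(d) for d in str(m1)))
--             if m1 == m2:
--                 if i == n:
--                     return k
--                 else:
--                     break
--             m1 = m2
--         k += 1
-- ===== SOURCE B (Python) =====
-- def A091049(n):
--     def steps(m):
--         nxt = int(str(m), 1 + max(int(d) for d in str(m)))
--         return 0 if nxt == m else 1 + steps(nxt)
--     k = 1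
--     while steps(k) != n:
--         k += 1
--     return k
-- ===== Notes on version B (the rewrite author's own statement) =====
-- stated objective: simpler
-- what changed: A's fused bounded for-loop, which mixes step counting with an early return on the last index and a break, is replaced by a clean recursive helper steps(m) counting iterations of the digit-reinterpretation map to its fixed point, plus a search loop returning the first k whose count equals the requested number of steps; Pre_ excludes negative arguments, on which A loops forever (its inner loop body never runs) and B likewise never returns.
import Mathlib
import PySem

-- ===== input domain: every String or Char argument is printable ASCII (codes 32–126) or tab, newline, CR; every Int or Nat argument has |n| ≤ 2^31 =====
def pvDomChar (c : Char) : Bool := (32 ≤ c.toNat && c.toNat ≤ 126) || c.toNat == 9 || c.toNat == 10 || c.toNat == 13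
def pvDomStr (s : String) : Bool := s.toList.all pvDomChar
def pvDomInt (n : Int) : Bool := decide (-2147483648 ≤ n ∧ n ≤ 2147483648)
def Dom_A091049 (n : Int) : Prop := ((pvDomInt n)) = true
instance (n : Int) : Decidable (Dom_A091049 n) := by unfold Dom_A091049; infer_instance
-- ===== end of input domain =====

-- B replaces A's fused bounded loop (step counting + i==n early return + break) by a
-- run-to-convergence step counter and an equality test: a simpler decomposition, same cost.


-- Shared helper: the step expression 'int(str(m1), 1 + max(int(d) for d in str(m1)))'
-- appears verbatim in both Pythons; transliterated once via PySem (str → toChars,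
-- int(d) → ofChars? on the single char, max → List.max?, int(s, b) → ofCharsBase?).
-- The .getD 0 arms are the points where Python would raise (empty max / bad base);
-- they are unreachable for the positive m both programs feed in.
def pvStep (m : Int) : Int :=
  let s := PySem.Int.toChars m
  let b := 1 + (PySem.List.max? (s.map (fun c => (PySem.Int.ofChars? [c]).getD 0)) id).getD 0
  (PySem.Int.ofCharsBase? s b).getD 0

-- ===== PORT A =====
-- A's inner 'for i in range(n+1)' over the current value m1; some k = 'return k',
-- none = break or fall-through (then the outer loop advances k).
def A091049_inner (n : Int) : List Int → Int → Int → Option Int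
  | [], _, _ => none
  | i :: rest, m1, k =>
    let m2 := pvStep m1
    if m1 = m2 then (if i = n then some k else none)
    else A091049_inner n rest m2 k

-- A's 'while True' over k, fueled only to make it total (the fuel is not part of A:
-- it is never exhausted on any input on which the Python returns).
def A091049_outer (n : Int) : Nat → Int → Int
  | 0, _ => 0
  | fuel + 1, k =>
    match A091049_inner n (PySem.List.pyRange 0 (n + 1) 1) k k with
    | some r => r
    | none => A091049_outer n fuel (k + 1)

def A091049 (n : Int) : Int := A091049_outer n 1000000000000 1

-- ===== PORT B =====
-- B's recursive steps(m): count applications of pvStep to the fixed point.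
-- Fueled with n+1 only to be total: some c is a count c ≤ n, none means
-- 'more than n steps', which compares unequal to n exactly as Python's exact count does.
def A091049_alt_steps (n : Int) : Nat → Int → Option Int
  | 0, _ => none
  | fuel + 1, m =>
    let nxt := pvStep m
    if nxt = m then some 0 else (A091049_alt_steps n fuel nxt).map (· + 1)

-- B's 'while steps(k) != n: k += 1', fueled only to be total (same fuel constant as A's port).
def A091049_alt_outer (n : Int) : Nat → Int → Int
  | 0, _ => 0
  | fuel + 1, k =>
    if A091049_alt_steps n (n.toNat + 1) k = some n then k
    else A091049_alt_outer n fuel (k + 1)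

def A091049_alt (n : Int) : Int := A091049_alt_outer n 1000000000000 1

-- ===== PRECONDITION & SPEC =====
-- For n < 0 the Python A never returns (range(n+1) is empty, so the outer loop runs
-- forever); B likewise never returns there. Pre_ excludes exactly those inputs.
def Pre_A091049 (n : Int) : Prop := 0 ≤ n
instance (n : Int) : Decidable (Pre_A091049 n) := by unfold Pre_A091049; infer_instance
def pvWitness_A091049 : Int := (1)

def Spec_A091049 (n : Int) (out : Int) : Prop := out = A091049_alt n
instance (n : Int) (out : Int) : Decidable (Spec_A091049 n out) := by unfold Spec_A091049; infer_instance

-- ===== CLAIM (what is proved, stated in full; the proofs are below) =====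
def Claim_equal_A091049 : Prop := ∀ (n : Int), Dom_A091049 n → Pre_A091049 n → Spec_A091049 n (A091049 n)

-- ===== LEMMAS AND PROOFS =====

-- A's inner loop over the tail range [n+1-f, n+1) succeeds (returns k) iff B's counter,
-- given the matching fuel f, reports exactly f-1 remaining steps to the fixed point.
theorem pv_inner_eq (n k : Int) :
    ∀ (f : Nat) (m : Int), (f : Int) ≤ n + 1 →
      A091049_inner n (PySem.List.pyRange (n + 1 - (f : Int)) (n + 1) 1) m k
        = if A091049_alt_steps n f m = some ((f : Int) - 1) then some k else none := by
  intro f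
  induction f with
  | zero =>
      intro m _
      rw [show n + 1 - ((0 : Nat) : Int) = n + 1 by simp,
        PySem.List.pyRange_one_eq_nil (le_refl _)]
      simp [A091049_inner, A091049_alt_steps]
  | succ f ih =>
      intro m hf
      have hcast : ((f + 1 : Nat) : Int) = (f : Int) + 1 := by push_cast; ring
      rw [hcast] at hf ⊢
      have hlt : n + 1 - ((f : Int) + 1) < n + 1 := by omega
      rw [PySem.List.pyRange_one_cons hlt]
      rw [show n + 1 - ((f : Int) + 1) + 1 = n + 1 - (f : Int) by ring]
      show (let m2 := pvStep m;
        if m = m2 then (if n + 1 - ((f : Int) + 1) = n then some k else none)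
        else A091049_inner n (PySem.List.pyRange (n + 1 - (f : Int)) (n + 1) 1) m2 k)
        = _
      by_cases h : pvStep m = m
      · -- fixed point reached now: steps = some 0; inner succeeds iff this i is n, i.e. f = 0
        by_cases h0 : (f : Int) = 0
        · have e1 : n + 1 - ((f : Int) + 1) = n := by omega
          have e2 : (0 : Int) = (f : Int) + 1 - 1 := by omega
          simp [A091049_alt_steps, h, e1, e2]
        · have e1 : ¬ f = 0 := by omega
          have e2 : ¬ (0 : Int) = (f : Int) := by omega
          simp [A091049_alt_steps, h, e1, e2]
      · have h' : ¬ m = pvStep m := fun hh => h hh.symm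
        simp only [A091049_alt_steps, if_neg h', if_neg h]
        rw [ih (pvStep m) (by omega)]
        rcases hs : A091049_alt_steps n f (pvStep m) with _ | c
        · simp
        · simp only [Option.map_some]
          by_cases hc : c = (f : Int) - 1
          · rw [if_pos (by rw [hc]), if_pos (by rw [hc]; ring_nf)]
          · rw [if_neg (by simpa using hc), if_neg (by intro hh; apply hc; injection hh with hh; omega)]

-- the two fueled searches agree step for step
theorem pv_outer_eq (n : Int) (hn : 0 ≤ n) :
    ∀ (fuel : Nat) (k : Int), A091049_outer n fuel k = A091049_alt_outer n fuel k := by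
  intro fuel
  induction fuel with
  | zero => intro k; rfl
  | succ f ih =>
      intro k
      have hfull : ((n.toNat + 1 : Nat) : Int) = n + 1 := by omega
      have h := pv_inner_eq n k (n.toNat + 1) k (by omega)
      rw [hfull] at h
      rw [show n + 1 - (n + 1) = 0 by ring] at h
      rw [show n + 1 - 1 = n by ring] at h
      show (match A091049_inner n (PySem.List.pyRange 0 (n + 1) 1) k k with
        | some r => r
        | none => A091049_outer n f (k + 1)) = _
      rw [h]
      by_cases hc : A091049_alt_steps n (n.toNat + 1) k = some n
      · simp [A091049_alt_outer, hc]
      · simp [A091049_alt_outer, hc, ih]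

-- ===== VERDICT (by name: the statement is the Claim_ definition above) =====
theorem A091049_spec : Claim_equal_A091049 := by
  intro n _ hn
  unfold Spec_A091049 A091049 A091049_alt
  exact pv_outer_eq n hn _ 1
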